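-- pv_equiv track=rewrite | github.com/JungBin-Eom/Algorithm | Programmers/BadUser/baduser.py | solution
-- ===== SOURCE A (Python) =====
-- from itertools import product
--
-- def solution(user_id, banned_id):
--   banned_users = []
--   for banned in banned_id:
--     find = []
--     for user in user_id:
--       if len(user) == len(banned):
--         flag = True
--         for i in range(len(user)):
--           if user[i] != banned[i] and banned[i] != "*":
--             flag = False
--             break
--         if flag == True:
--           find.append(user)
--     banned_users.append(find)
--
--   banned_users = [list(set(x)) for x in banned_users]
--   comb = list(product(*banned_users))
--
--   result = set()
--   for items in comb:
--     items = list(items)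
--     if len(set(items)) == len(banned_id):
--       result.add(tuple(sorted(items)))
--
--   return len(result)
-- ===== SOURCE B (Python) =====
-- def solution(user_id, banned_id):
--     def match(u, b):
--         return len(u) == len(b) and all(bc == "*" or uc == bc for uc, bc in zip(u, b))
--
--     partials = {()}
--     for b in banned_id:
--         cands = {u for u in user_id if match(u, b)}
--         nxt = set()
--         for p in partials:
--             for u in cands:
--                 if u not in p:
--                     nxt.add(tuple(sorted(p + (u,))))
--         partials = nxt
--     return len(partials)
-- ===== Notes on version B (the rewrite author's own statement) =====
-- stated objective: alternative
-- what changed: B replaces A's materialized full cartesian product of all candidate lists followed by a distinctness filter with a level-by-level fold that keeps a deduplicated set of sorted partial assignments, extending each by one distinct candidate per pattern.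
import Mathlib
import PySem

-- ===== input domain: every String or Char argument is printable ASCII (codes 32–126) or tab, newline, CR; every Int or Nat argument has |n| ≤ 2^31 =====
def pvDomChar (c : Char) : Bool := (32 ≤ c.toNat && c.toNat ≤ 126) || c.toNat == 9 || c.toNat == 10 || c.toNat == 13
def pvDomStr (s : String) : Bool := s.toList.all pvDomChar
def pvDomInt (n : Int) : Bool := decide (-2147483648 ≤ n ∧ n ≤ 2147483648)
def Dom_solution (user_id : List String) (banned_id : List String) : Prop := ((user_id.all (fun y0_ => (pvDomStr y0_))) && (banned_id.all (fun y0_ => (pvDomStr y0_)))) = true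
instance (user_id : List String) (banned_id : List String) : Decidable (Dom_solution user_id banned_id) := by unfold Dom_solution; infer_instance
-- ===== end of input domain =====

-- B replaces A's full cartesian product + distinctness filter by a level-by-level
-- fold that extends a deduplicated set of sorted partial assignments (objective:
-- alternative).
-- A iterates list(set(...)) and B iterates sets; both ports use first-insertion
-- order there — the RETURN VALUE (a count of a set) does not depend on that order.

-- ===== PORT A =====
-- the inner character loop of A (flag/break)
def chkA : List Char → List Char → Bool
  | u :: us, b :: bs => if u ≠ b ∧ b ≠ '*' then false else chkA us bs
  | _, _ => true

-- itertools.product(*lists) over lists of strings, in CPython's order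
def pyProduct : List (List String) → List (List String)
  | [] => [[]]
  | l :: rest => l.flatMap (fun x => (pyProduct rest).map (fun t => x :: t))

def solution (user_id : List String) (banned_id : List String) : Int :=
  let banned_users := banned_id.foldl (fun acc banned =>
    acc ++ [user_id.foldl (fun find user =>
        if PySem.Str.len user == PySem.Str.len banned then
          (if chkA user.toList banned.toList then find ++ [user] else find)
        else find) []]) []
  let banned_users2 := banned_users.foldl
    (fun acc x => acc ++ [PySem.Set.ofList x]) []
  let comb := pyProduct banned_users2
  let result := comb.foldl (fun r items =>
      if PySem.Set.len (PySem.Set.ofList items) == (banned_id.length : Int) then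
        PySem.Set.add r (PySem.List.sorted items (fun x => x) false)
      else r) PySem.Set.empty
  PySem.Set.len result

-- ===== PORT B =====
def matchB (u b : String) : Bool :=
  PySem.Str.len u == PySem.Str.len b &&
    (u.toList.zip b.toList).all (fun p => p.2 == '*' || p.1 == p.2)

def stepB (user_id : List String) (partials : PySem.Set (List String)) (b : String) :
    PySem.Set (List String) :=
  let cands := PySem.Set.ofList (user_id.filter (fun u => matchB u b))
  partials.foldl (fun nxt p =>
    cands.foldl (fun nxt u =>
      if u ∈ p then nxt
      else PySem.Set.add nxt (PySem.List.sorted (p ++ [u]) (fun x => x) false)) nxt)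
    PySem.Set.empty

def solution_alt (user_id : List String) (banned_id : List String) : Int :=
  let final := banned_id.foldl (stepB user_id) (PySem.Set.ofList [([] : List String)])
  PySem.Set.len final

-- ===== PRECONDITION & SPEC =====
def Spec_solution (user_id : List String) (banned_id : List String) (out : Int) : Prop := out = solution_alt user_id banned_id
instance (user_id : List String) (banned_id : List String) (out : Int) : Decidable (Spec_solution user_id banned_id out) := by unfold Spec_solution; infer_instance

-- ===== CLAIM (what is proved, stated in full; the proofs are below) =====
def Claim_equal_solution : Prop := ∀ (user_id : List String) (banned_id : List String), Dom_solution user_id banned_id → Spec_solution user_id banned_id (solution user_id banned_id)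

-- ===== LEMMAS AND PROOFS =====

-- A's char loop equals B's zip/all test
theorem chkA_eq_all : ∀ (us bs : List Char),
    chkA us bs = (us.zip bs).all (fun p => p.2 == '*' || p.1 == p.2) := by
  intro us
  induction us with
  | nil => intro bs; cases bs <;> simp [chkA]
  | cons u us ih =>
    intro bs
    cases bs with
    | nil => simp [chkA]
    | cons b bs =>
      simp only [chkA, List.zip_cons_cons, List.all_cons, ih]
      by_cases h : u ≠ b ∧ b ≠ '*'
      · simp [h]
      · simp only [h, if_false]
        have : (b == '*' || u == b) = true := by
          rcases not_and_or.mp h with h1 | h2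
          · simp at h1; simp [h1]
          · simp at h2; simp [h2]
        simp [this]

-- A's per-pattern guard equals matchB
theorem guard_eq_matchB (u b : String) :
    ((PySem.Str.len u == PySem.Str.len b) && chkA u.toList b.toList) = matchB u b := by
  simp [matchB, chkA_eq_all]

-- membership in pyProduct
theorem mem_pyProduct_cons (l : List String) (ls : List (List String)) (t : List String) :
    t ∈ pyProduct (l :: ls) ↔ ∃ x ∈ l, ∃ t' ∈ pyProduct ls, t = x :: t' := by
  simp [pyProduct]
  tauto

theorem length_of_mem_pyProduct : ∀ (ls : List (List String)) (t : List String),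
    t ∈ pyProduct ls → t.length = ls.length := by
  intro ls
  induction ls with
  | nil => intro t ht; simp [pyProduct] at ht; simp [ht]
  | cons l ls ih =>
    intro t ht
    rw [mem_pyProduct_cons] at ht
    obtain ⟨x, _, t', ht', rfl⟩ := ht
    simp [ih t' ht']

-- Set.add preserves Nodup
theorem nodup_set_add {γ : Type} [BEq γ] [LawfulBEq γ] (s : PySem.Set γ) (x : γ)
    (h : s.Nodup) : (PySem.Set.add s x).Nodup := by
  unfold PySem.Set.add
  split
  · exact h
  · rename_i hc
    have hx : x ∉ s := by simpa using hc
    simp only [List.nodup_append, List.nodup_singleton, true_and, h]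
    intro a ha b hb heq
    rw [List.mem_singleton] at hb
    subst hb
    exact hx (heq ▸ ha)

-- generic membership through a fold whose step satisfies x ∈ g s y ↔ x ∈ s ∨ Q y x
theorem mem_foldl_of_step {α γ : Type} (g : PySem.Set γ → α → PySem.Set γ)
    (Q : α → γ → Prop) (hg : ∀ s y x, x ∈ g s y ↔ x ∈ s ∨ Q y x) :
    ∀ (l : List α) (s : PySem.Set γ) (x : γ),
      x ∈ l.foldl g s ↔ x ∈ s ∨ ∃ y ∈ l, Q y x := by
  intro l
  induction l with
  | nil => simp
  | cons y l ih =>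
    intro s x
    simp only [List.foldl_cons, ih, hg]
    constructor
    · rintro (( h | h) | ⟨y', hy', h⟩)
      · exact Or.inl h
      · exact Or.inr ⟨y, by simp, h⟩
      · exact Or.inr ⟨y', by simp [hy'], h⟩
    · rintro (h | ⟨y', hy', h⟩)
      · exact Or.inl (Or.inl h)
      · rcases List.mem_cons.mp hy' with rfl | hy'
        · exact Or.inl (Or.inr h)
        · exact Or.inr ⟨y', hy', h⟩

-- generic Nodup preservation through a fold
theorem nodup_foldl_of_step {α γ : Type} (g : PySem.Set γ → α → PySem.Set γ)
    (hg : ∀ s y, s.Nodup → (g s y).Nodup) :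
    ∀ (l : List α) (s : PySem.Set γ), s.Nodup → (l.foldl g s).Nodup := by
  intro l
  induction l with
  | nil => intro s hs; simpa
  | cons y l ih => intro s hs; exact ih _ (hg s y hs)

-- membership in one step of B
theorem mem_stepB (user_id : List String) (b : String) (P : PySem.Set (List String))
    (x : List String) :
    x ∈ stepB user_id P b ↔
      ∃ p ∈ P, ∃ u ∈ user_id.filter (fun u => matchB u b), u ∉ p ∧
        x = PySem.List.sorted (p ++ [u]) (fun x => x) false := by
  unfold stepB
  rw [mem_foldl_of_step
    (Q := fun p x => ∃ u ∈ user_id.filter (fun u => matchB u b), u ∉ p ∧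
        x = PySem.List.sorted (p ++ [u]) (fun x => x) false)]
  · simp [PySem.Set.empty]
  · intro s p x
    rw [mem_foldl_of_step
      (Q := fun u x => u ∉ p ∧ x = PySem.List.sorted (p ++ [u]) (fun x => x) false)]
    · simp [PySem.Set.mem_ofList]
    · intro s' u x'
      split
      · rename_i hu; simp [hu]
      · rename_i hu; rw [PySem.Set.mem_add]; tauto

-- one step of B preserves Nodup of the set
theorem nodup_stepB (user_id : List String) (b : String) (P : PySem.Set (List String)) :
    (stepB user_id P b).Nodup := by
  unfold stepB
  apply nodup_foldl_of_step
  · intro s p hs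
    apply nodup_foldl_of_step _ _ _ _ hs
    intro s' u hs'
    split
    · exact hs'
    · exact nodup_set_add _ _ hs'
  · simp [PySem.Set.empty]

-- elements of one step of B are sorted nodup lists
theorem stepB_elems (user_id : List String) (b : String) (P : PySem.Set (List String))
    (hP : ∀ p ∈ P, p.Nodup ∧ PySem.List.sorted p (fun x => x) false = p) :
    ∀ q ∈ stepB user_id P b, q.Nodup ∧ PySem.List.sorted q (fun x => x) false = q := by
  intro q hq
  rw [mem_stepB] at hq
  obtain ⟨p, hp, u, hu, hup, rfl⟩ := hq
  have hnd : (p ++ [u]).Nodup := by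
    simp only [List.nodup_append, List.nodup_singleton, true_and, (hP p hp).1]
    intro a ha b hb heq
    rw [List.mem_singleton] at hb
    subst hb
    exact hup (heq ▸ ha)
  constructor
  · exact ((PySem.List.sorted_perm (p ++ [u]) (fun x => x) false).nodup_iff).mpr hnd
  · exact PySem.List.sorted_sorted _ _

-- main invariant for B's fold
theorem mem_foldl_stepB (user_id : List String) : ∀ (bs : List String)
    (P : PySem.Set (List String))
    (hP : ∀ p ∈ P, p.Nodup ∧ PySem.List.sorted p (fun x => x) false = p)
    (x : List String),
    x ∈ bs.foldl (stepB user_id) P ↔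
      ∃ p ∈ P, ∃ t ∈ pyProduct (bs.map (fun b =>
          PySem.Set.ofList (user_id.filter (fun u => matchB u b)))),
        (p ++ t).Nodup ∧ x = PySem.List.sorted (p ++ t) (fun x => x) false := by
  intro bs
  induction bs with
  | nil =>
    intro P hP x
    simp only [List.foldl_nil, List.map_nil, pyProduct, List.mem_singleton]
    constructor
    · intro hx
      exact ⟨x, hx, [], rfl, by simpa using (hP x hx).1, by simp [(hP x hx).2]⟩
    · rintro ⟨p, hp, t, rfl, _, rfl⟩
      simpa [(hP p hp).2] using hp
  | cons b bs ih =>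
    intro P hP x
    simp only [List.foldl_cons, List.map_cons]
    rw [ih _ (stepB_elems user_id b P hP)]
    constructor
    · rintro ⟨q, hq, t, ht, hnd, rfl⟩
      rw [mem_stepB] at hq
      obtain ⟨p, hp, u, hu, hup, rfl⟩ := hq
      have hperm : (PySem.List.sorted (p ++ [u]) (fun x => x) false ++ t).Perm (p ++ u :: t) := by
        have := (PySem.List.sorted_perm (p ++ [u]) (fun x => x) false).append_right t
        simpa using this
      refine ⟨p, hp, u :: t, ?_, ?_, ?_⟩
      · rw [mem_pyProduct_cons]
        exact ⟨u, by simp [PySem.Set.mem_ofList, hu], t, ht, rfl⟩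
      · exact hperm.nodup_iff.mp hnd
      · exact PySem.List.sorted_eq_sorted_of_perm _ _ _ (fun a b h => h) hperm
    · rintro ⟨p, hp, t', ht', hnd, rfl⟩
      rw [mem_pyProduct_cons] at ht'
      obtain ⟨u, hu, t, ht, rfl⟩ := ht'
      rw [PySem.Set.mem_ofList] at hu
      have hup : u ∉ p := by
        simp only [List.nodup_append, List.nodup_cons] at hnd
        exact fun hmem => (hnd.2.2 u hmem) u (by simp) rfl
      have hperm : (PySem.List.sorted (p ++ [u]) (fun x => x) false ++ t).Perm (p ++ u :: t) := by
        have := (PySem.List.sorted_perm (p ++ [u]) (fun x => x) false).append_right t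
        simpa using this
      refine ⟨PySem.List.sorted (p ++ [u]) (fun x => x) false,
        (mem_stepB user_id b P _).mpr ⟨p, hp, u, hu, hup, rfl⟩, t, ht, ?_, ?_⟩
      · exact hperm.nodup_iff.mpr hnd
      · exact (PySem.List.sorted_eq_sorted_of_perm _ _ _ (fun a b h => h) hperm).symm

-- (Set.ofList t).length = t.length iff t has no duplicates
theorem ofList_len_iff_nodup (t : List String) :
    (PySem.Set.ofList t).length = t.length ↔ t.Nodup := by
  have h1 : (PySem.Set.ofList t).toFinset = t.toFinset := by
    ext a; simp [PySem.Set.mem_ofList]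
  have h2 : (PySem.Set.ofList t).length = t.dedup.length := by
    rw [← List.toFinset_card_of_nodup (PySem.Set.nodup_ofList t), h1, List.card_toFinset]
  rw [h2]
  constructor
  · intro h
    have he := List.Sublist.eq_of_length (List.dedup_sublist t) h
    rw [← he]
    exact List.nodup_dedup t
  · intro h
    rw [List.dedup_eq_self.mpr h]

-- A's inner loop over user_id computes filter matchB
theorem innerA_eq_filter (user_id : List String) (b : String) :
    user_id.foldl (fun find user =>
        if PySem.Str.len user == PySem.Str.len b then
          (if chkA user.toList b.toList then find ++ [user] else find)
        else find) [] = user_id.filter (fun u => matchB u b) := by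
  have hc : user_id.foldl (fun find user =>
        if PySem.Str.len user == PySem.Str.len b then
          (if chkA user.toList b.toList then find ++ [user] else find)
        else find) [] =
      user_id.foldl (fun find user =>
        if ((PySem.Str.len user == PySem.Str.len b) && chkA user.toList b.toList) then
          find ++ [user] else find) [] := by
    apply PySem.List.foldl_congr_mem
    intro acc x _
    by_cases h1 : (PySem.Str.len x == PySem.Str.len b) = true
    · by_cases h2 : chkA x.toList b.toList = true <;> simp [h2]
    · have h1' : ¬ x.length = b.length := by simpa using h1
      simp [h1']
  rw [hc, PySem.List.foldl_append_if_eq_filter, List.nil_append]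
  exact List.filter_congr (fun u _ => guard_eq_matchB u b)

-- membership in A's result fold
theorem mem_resultA (comb : List (List String)) (n : Int) (x : List String) :
    x ∈ comb.foldl (fun r items =>
        if PySem.Set.len (PySem.Set.ofList items) == n then
          PySem.Set.add r (PySem.List.sorted items (fun x => x) false)
        else r) PySem.Set.empty ↔
      ∃ t ∈ comb, PySem.Set.len (PySem.Set.ofList t) = n ∧
        x = PySem.List.sorted t (fun x => x) false := by
  rw [mem_foldl_of_step
    (Q := fun t x => PySem.Set.len (PySem.Set.ofList t) = n ∧
        x = PySem.List.sorted t (fun x => x) false)]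
  · simp [PySem.Set.empty]
  · intro s t x
    split
    · rename_i h
      rw [PySem.Set.mem_add]
      simp only [beq_iff_eq] at h
      simp only [h, true_and]
    · rename_i h
      simp only [beq_iff_eq] at h
      constructor
      · exact Or.inl
      · rintro (hx | ⟨h1, _⟩)
        · exact hx
        · exact absurd h1 h

-- the two ports agree
theorem main_eq (user_id banned_id : List String) :
    solution user_id banned_id = solution_alt user_id banned_id := by
  unfold solution solution_alt
  simp only [PySem.List.foldl_append_singleton_eq_map, List.nil_append, List.map_map,
    Function.comp_def]
  have hmap : banned_id.map (fun banned => PySem.Set.ofList (user_id.foldl (fun find user =>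
        if PySem.Str.len user == PySem.Str.len banned then
          (if chkA user.toList banned.toList then find ++ [user] else find)
        else find) [])) =
      banned_id.map (fun b => PySem.Set.ofList (user_id.filter (fun u => matchB u b))) := by
    exact List.map_congr_left (fun b _ => by rw [innerA_eq_filter])
  rw [hmap]
  have hP0 : ∀ p ∈ (PySem.Set.ofList [([] : List String)]), p.Nodup ∧
      PySem.List.sorted p (fun x => x) false = p := by
    intro p hp
    have : p = [] := by simpa [PySem.Set.ofList, PySem.Set.add, PySem.Set.empty] using hp
    subst this
    exact ⟨List.nodup_nil, (PySem.List.sorted_eq_nil_iff _ _ _).mpr rfl⟩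
  have ndA : (List.foldl (fun r items =>
      if PySem.Set.len (PySem.Set.ofList items) == (banned_id.length : Int) then
        PySem.Set.add r (PySem.List.sorted items (fun x => x) false)
      else r) PySem.Set.empty (pyProduct (banned_id.map (fun b =>
        PySem.Set.ofList (user_id.filter (fun u => matchB u b)))))).Nodup := by
    apply nodup_foldl_of_step
    · intro s y hs
      split
      · exact nodup_set_add _ _ hs
      · exact hs
    · exact List.nodup_nil
  have ndB : (List.foldl (stepB user_id) (PySem.Set.ofList [([] : List String)]) banned_id).Nodup := by
    apply nodup_foldl_of_step
    · exact fun s b _ => nodup_stepB user_id b s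
    · exact List.nodup_singleton _
  have hmem : ∀ x, x ∈ (List.foldl (fun r items =>
      if PySem.Set.len (PySem.Set.ofList items) == (banned_id.length : Int) then
        PySem.Set.add r (PySem.List.sorted items (fun x => x) false)
      else r) PySem.Set.empty (pyProduct (banned_id.map (fun b =>
        PySem.Set.ofList (user_id.filter (fun u => matchB u b)))))) ↔
      x ∈ List.foldl (stepB user_id) (PySem.Set.ofList [([] : List String)]) banned_id := by
    intro x
    rw [mem_resultA, mem_foldl_stepB user_id banned_id _ hP0]
    constructor
    · rintro ⟨t, ht, hlen, rfl⟩
      refine ⟨[], by simp [PySem.Set.ofList, PySem.Set.add, PySem.Set.empty], t, ht, ?_, rfl⟩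
      have hl : t.length = banned_id.length := by
        rw [length_of_mem_pyProduct _ _ ht, List.length_map]
      rw [List.nil_append]
      rw [← ofList_len_iff_nodup, hl]
      unfold PySem.Set.len at hlen
      exact_mod_cast hlen
    · rintro ⟨p, hp, t, ht, hnd, rfl⟩
      have : p = [] := by simpa [PySem.Set.ofList, PySem.Set.add, PySem.Set.empty] using hp
      subst this
      rw [List.nil_append] at hnd ⊢
      refine ⟨t, ht, ?_, rfl⟩
      have hl : t.length = banned_id.length := by
        rw [length_of_mem_pyProduct _ _ ht, List.length_map]
      unfold PySem.Set.len
      rw [ofList_len_iff_nodup t |>.mpr hnd, hl]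
  unfold PySem.Set.len
  have := ((List.perm_ext_iff_of_nodup ndA ndB).mpr hmem).length_eq
  exact_mod_cast this


-- ===== VERDICT (by name: the statement is the Claim_ definition above) =====
theorem solution_spec : Claim_equal_solution :=
  fun user_id banned_id _ => main_eq user_id banned_id
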